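-- pv_equiv track=rewrite | github.com/CohortInsights/financials | financials/utils/google_types.py | _select_primary_type
-- ===== SOURCE A (Python) =====
-- def _select_primary_type(filtered_types, type_priority_map):
--     """
--     Determine the single best merchant type via weighted scoring:
--
--         score = priority_from_csv + google_reverse_rank
--
--     Where google_reverse_rank = N - idx for a list of length N.
--
--     Args:
--         filtered_types (list[str]):
--             Whitelisted Google types returned by the API.
--         type_priority_map (dict[str, int]):
--             Merchant type → priority score loaded from CSV → Mongo.
--
--     Returns:
--         str | None:
--             The highest scoring type, or None if filtered_types is empty.
--     """
--     if not filtered_types: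
--         return None
--
--     n = len(filtered_types)
--     best_type = None
--     best_score = -1
--
--     for idx, t in enumerate(filtered_types):
--         csv_priority = type_priority_map.get(t, 0)
--         google_weight = n - idx
--         score = csv_priority + google_weight
--
--         if score > best_score:
--             best_score = score
--             best_type = t
--
--     return best_type
-- ===== SOURCE B (Python) =====
-- def _select_primary_type(filtered_types, type_priority_map):
--     """Sort-then-pick: order all indices by descending (score, -idx) and take the top one."""
--     if not filtered_types:
--         return None
--     n = len(filtered_types)
--     order = sorted(range(n),
--                    key=lambda i: (type_priority_map.get(filtered_types[i], 0) + (n - i), -i),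
--                    reverse=True)
--     return filtered_types[order[0]]
-- ===== Notes on version B (the rewrite author's own statement) =====
-- stated objective: alternative
-- what changed: Replaces A's single threshold-guarded argmax scan (best_score sentinel -1) by sorting all indices descending on the tie-broken key (score, -idx) and picking the head.
-- intended difference: On non-empty lists where every score priority+(n-idx) is <= -1 (all priorities negative enough), A returns None because of its -1 sentinel, contradicting its docstring ('None if filtered_types is empty'); B returns the highest-scoring type, the intended value. — e.g. on _select_primary_type(["a"], [("a", -5)]): A returns none, B returns some "a"
import Mathlib
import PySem

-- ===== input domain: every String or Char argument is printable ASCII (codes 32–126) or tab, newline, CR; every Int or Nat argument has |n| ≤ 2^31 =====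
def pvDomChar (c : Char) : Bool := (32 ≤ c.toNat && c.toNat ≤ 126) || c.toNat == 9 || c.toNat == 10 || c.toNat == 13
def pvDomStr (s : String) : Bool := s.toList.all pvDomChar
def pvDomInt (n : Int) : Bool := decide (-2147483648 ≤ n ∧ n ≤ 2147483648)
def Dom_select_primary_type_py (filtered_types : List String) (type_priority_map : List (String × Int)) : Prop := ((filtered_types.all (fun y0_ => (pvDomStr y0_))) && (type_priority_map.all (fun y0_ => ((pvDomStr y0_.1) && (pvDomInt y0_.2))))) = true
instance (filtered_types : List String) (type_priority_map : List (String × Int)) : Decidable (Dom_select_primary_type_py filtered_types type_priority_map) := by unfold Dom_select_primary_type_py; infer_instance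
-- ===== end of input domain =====

-- B replaces A's threshold-guarded argmax scan by sort-all-indices-descending-then-pick-head (objective: alternative);
-- return-value equivalence outside D_; neither version mutates its arguments.

-- ===== PORT A =====
def select_primary_type_py (filtered_types : List String) (type_priority_map : List (String × Int)) : Option String :=
  if filtered_types = [] then none
  else
    let n : Int := PySem.List.len filtered_types
    let r := (PySem.List.enumerate filtered_types).foldl
      (fun (st : Option String × Int) p =>
        let csv_priority : Int := (List.lookup p.2 type_priority_map).getD 0
        let google_weight : Int := n - p.1
        let score := csv_priority + google_weight
        if score > st.2 then (some p.2, score) else st)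
      (none, -1)
    r.1

-- ===== PORT B =====
def select_primary_type_py_alt (filtered_types : List String) (type_priority_map : List (String × Int)) : Option String :=
  if filtered_types = [] then none
  else
    let n : Int := PySem.List.len filtered_types
    let order := PySem.List.sorted2 (PySem.List.pyRange 0 n)
      (fun i => (List.lookup (PySem.List.pyGet? filtered_types i |>.getD "") type_priority_map).getD 0 + (n - i))
      (fun i => -i) true
    some ((PySem.List.pyGet? filtered_types (PySem.List.pyGet? order 0 |>.getD 0)).getD "")

-- ===== PRECONDITION & SPEC =====
-- A returns None (contradicting its own docstring: 'None if filtered_types is empty') whenever every weighted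
-- score is ≤ its -1 sentinel, i.e. on non-empty lists whose priorities are all negative enough; B returns the
-- highest-scoring type there, which is the intended value.
def D_select_primary_type_py (filtered_types : List String) (type_priority_map : List (String × Int)) : Prop :=
  filtered_types ≠ [] ∧ ∀ k, (h : k < filtered_types.length) →
    (List.lookup filtered_types[k] type_priority_map).getD 0 + (filtered_types.length : Int) - (k : Int) ≤ -1
instance (filtered_types : List String) (type_priority_map : List (String × Int)) : Decidable (D_select_primary_type_py filtered_types type_priority_map) := by unfold D_select_primary_type_py; infer_instance

def Spec_select_primary_type_py (filtered_types : List String) (type_priority_map : List (String × Int)) (out : Option String) : Prop := ¬ D_select_primary_type_py filtered_types type_priority_map → out = select_primary_type_py_alt filtered_types type_priority_map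
instance (filtered_types : List String) (type_priority_map : List (String × Int)) (out : Option String) : Decidable (Spec_select_primary_type_py filtered_types type_priority_map out) := by unfold Spec_select_primary_type_py; infer_instance

def pvDiffWitness_select_primary_type_py : List String × (List (String × Int)) := (["a"], [("a", -5)])
def pvDiffWitnessOut_select_primary_type_py : (Option String) × (Option String) := (none, some "a")

-- ===== CLAIM (what is proved, stated in full; the proofs are below) =====
def Claim_unchanged_select_primary_type_py : Prop := ∀ (filtered_types : List String) (type_priority_map : List (String × Int)), Dom_select_primary_type_py filtered_types type_priority_map → Spec_select_primary_type_py filtered_types type_priority_map (select_primary_type_py filtered_types type_priority_map)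
def Claim_changed_select_primary_type_py : Prop := Dom_select_primary_type_py (pvDiffWitness_select_primary_type_py.1) (pvDiffWitness_select_primary_type_py.2) ∧ D_select_primary_type_py (pvDiffWitness_select_primary_type_py.1) (pvDiffWitness_select_primary_type_py.2) ∧ select_primary_type_py (pvDiffWitness_select_primary_type_py.1) (pvDiffWitness_select_primary_type_py.2) = pvDiffWitnessOut_select_primary_type_py.1 ∧ select_primary_type_py_alt (pvDiffWitness_select_primary_type_py.1) (pvDiffWitness_select_primary_type_py.2) = pvDiffWitnessOut_select_primary_type_py.2 ∧ pvDiffWitnessOut_select_primary_type_py.1 ≠ pvDiffWitnessOut_select_primary_type_py.2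
def Claim_exact_select_primary_type_py : Prop := ∀ (filtered_types : List String) (type_priority_map : List (String × Int)), Dom_select_primary_type_py filtered_types type_priority_map → D_select_primary_type_py filtered_types type_priority_map → select_primary_type_py filtered_types type_priority_map ≠ select_primary_type_py_alt filtered_types type_priority_map

-- ===== LEMMAS AND PROOFS =====

-- A's loop never updates when every remaining score is at most the running best.
theorem foldA_const (f : Int → Int) (v : Int → String) (l : List Int) (st : Option String × Int)
    (h : ∀ i ∈ l, f i ≤ st.2) :
    l.foldl (fun st j => if f j > st.2 then (some (v j), f j) else st) st = st := by
  induction l with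
  | nil => rfl
  | cons i rest ih =>
    have hi : ¬ f i > st.2 := by have := h i (by simp); omega
    simpa [hi] using ih (fun j hj => h j (by simp [hj]))

-- A's loop lands on the first index attaining the maximum score, once that beats the running best.
theorem foldA_argmax (f : Int → Int) (v : Int → String) (l : List Int) (m : Int)
    (hm : m ∈ l) (hpw : l.Pairwise (· < ·))
    (hmax : ∀ y ∈ l, f y ≤ f m) (hfirst : ∀ y ∈ l, f y = f m → m ≤ y)
    (st : Option String × Int) (hgt : st.2 < f m) :
    l.foldl (fun st j => if f j > st.2 then (some (v j), f j) else st) st = (some (v m), f m) := by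
  induction l generalizing st with
  | nil => cases hm
  | cons i rest ih =>
    rcases List.mem_cons.mp hm with rfl | hmr
    · have : f m > st.2 := hgt
      simp only [List.foldl_cons, if_pos this]
      exact foldA_const f v rest (some (v m), f m)
        (fun j hj => hmax j (by simp [hj]))
    · have him : i < m := (List.pairwise_cons.mp hpw).1 m hmr
      have hile : f i ≤ f m := hmax i (by simp)
      have hilt : f i < f m := by
        rcases lt_or_eq_of_le hile with h | h
        · exact h
        · exact absurd (hfirst i (by simp) h) (by omega)
      simp only [List.foldl_cons]
      by_cases hup : f i > st.2
      · simp only [if_pos hup]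
        exact ih hmr (List.pairwise_cons.mp hpw).2
          (fun y hy => hmax y (by simp [hy])) (fun y hy h => hfirst y (by simp [hy]) h) _ hilt
      · simp only [if_neg hup]
        exact ih hmr (List.pairwise_cons.mp hpw).2
          (fun y hy => hmax y (by simp [hy])) (fun y hy h => hfirst y (by simp [hy]) h) _ hgt

-- B's sort comparator, reverse form (sorted2 … true inserts with this relation).
def beforeRev (f : Int → Int) (a b : Int) : Bool :=
  decide (f b < f a) || (!decide (f a < f b) && decide (-b < -a))

theorem sorted2_eq_foldl (f : Int → Int) (xs : List Int) :
    PySem.List.sorted2 xs f (fun i => -i) true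
      = xs.foldl (fun acc x => PySem.List.insertBy (beforeRev f) x acc) [] := rfl

theorem beforeRev_irrefl (f : Int → Int) (a : Int) : beforeRev f a a = false := by
  simp [beforeRev]

theorem pairwise_insertBy (f : Int → Int) (x : Int) (acc : List Int)
    (h : acc.Pairwise (fun a b => beforeRev f b a = false)) :
    (PySem.List.insertBy (beforeRev f) x acc).Pairwise (fun a b => beforeRev f b a = false) := by
  induction acc with
  | nil => simp [PySem.List.insertBy]
  | cons y ys ih =>
    rcases List.pairwise_cons.mp h with ⟨hy, hys⟩
    by_cases hb : beforeRev f x y = true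
    · have hxy : beforeRev f y x = false := by
        simp only [beforeRev] at hb ⊢
        simp only [Bool.or_eq_true, Bool.and_eq_true, Bool.not_eq_true', decide_eq_true_eq,
          decide_eq_false_iff_not, Bool.or_eq_false_iff, Bool.and_eq_false_iff,
          Bool.not_eq_false'] at hb ⊢
        omega
      have hzs : ∀ z ∈ ys, beforeRev f z x = false := by
        intro z hz
        have hzy := hy z hz
        simp only [beforeRev] at hb hzy ⊢
        simp only [Bool.or_eq_true, Bool.and_eq_true, Bool.not_eq_true', decide_eq_true_eq,
          decide_eq_false_iff_not, Bool.or_eq_false_iff, Bool.and_eq_false_iff,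
          Bool.not_eq_false'] at hb hzy ⊢
        omega
      simp only [PySem.List.insertBy, hb, if_pos]
      exact List.pairwise_cons.mpr ⟨by
        intro z hz
        rcases List.mem_cons.mp hz with rfl | hz'
        · exact hxy
        · exact hzs z hz', h⟩
    · have hb' : beforeRev f x y = false := by simpa using hb
      simp only [PySem.List.insertBy, hb', Bool.false_eq_true, if_false]
      refine List.pairwise_cons.mpr ⟨?_, ih hys⟩
      intro z hz
      rcases (PySem.List.mem_insertBy (beforeRev f) x z ys).mp hz with rfl | hz'
      · exact hb'
      · exact hy z hz'

theorem pairwise_foldl_insertBy (f : Int → Int) (xs acc : List Int)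
    (h : acc.Pairwise (fun a b => beforeRev f b a = false)) :
    (xs.foldl (fun acc x => PySem.List.insertBy (beforeRev f) x acc) acc).Pairwise
      (fun a b => beforeRev f b a = false) := by
  induction xs generalizing acc with
  | nil => exact h
  | cons x xs ih => exact ih _ (pairwise_insertBy f x acc h)

-- Head of B's sorted index list: no index beats it under the comparator.
theorem head_sorted2_max (f : Int → Int) (xs : List Int) (m : Int) (t : List Int)
    (hs : PySem.List.sorted2 xs f (fun i => -i) true = m :: t) :
    ∀ y ∈ xs, beforeRev f y m = false := by
  intro y hy
  have hperm := PySem.List.sorted2_perm xs f (fun i => -i) true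
  rw [hs] at hperm
  have hy' : y ∈ m :: t := hperm.symm.mem_iff.mp hy
  have hpw : (m :: t).Pairwise (fun a b => beforeRev f b a = false) := by
    rw [← hs, sorted2_eq_foldl]
    exact pairwise_foldl_insertBy f xs [] (by simp)
  rcases List.mem_cons.mp hy' with rfl | hyt
  · exact beforeRev_irrefl f y
  · exact (List.pairwise_cons.mp hpw).1 y hyt

theorem pairwise_lt_pyRange_zero (n : Nat) :
    (PySem.List.pyRange 0 (n : Int)).Pairwise (· < ·) := by
  rw [PySem.List.pyRange_zero_natCast]
  exact List.pairwise_lt_range.map _ (fun a b h => by exact_mod_cast h)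

theorem select_primary_type_py_unchanged :
    ∀ (filtered_types : List String) (type_priority_map : List (String × Int)),
    ¬ D_select_primary_type_py filtered_types type_priority_map →
    select_primary_type_py filtered_types type_priority_map
      = select_primary_type_py_alt filtered_types type_priority_map := by
  intro ts mp hnd
  by_cases hts : ts = []
  · subst hts; rfl
  · -- notation
    set F : Int → Int :=
      fun i => (List.lookup ((PySem.List.pyGet? ts i).getD "") mp).getD 0 + (PySem.List.len ts - i) with hF
    have hn0 : 0 < ts.length := List.length_pos_of_ne_nil hts
    -- the sorted index list is non-empty
    obtain ⟨m, t, hs⟩ :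
        ∃ m t, PySem.List.sorted2 (PySem.List.pyRange 0 (PySem.List.len ts)) F (fun i => -i) true = m :: t := by
      have hperm := PySem.List.sorted2_perm (PySem.List.pyRange 0 (PySem.List.len ts)) F (fun i => -i) true
      have h0 : (0 : Int) ∈ PySem.List.pyRange 0 (PySem.List.len ts) := by
        rw [PySem.List.mem_pyRange_one]
        constructor
        · omega
        · simp [PySem.List.len]; omega
      have : PySem.List.sorted2 (PySem.List.pyRange 0 (PySem.List.len ts)) F (fun i => -i) true ≠ [] := by
        intro hnil
        rw [hnil] at hperm
        exact absurd (hperm.symm.mem_iff.mp h0) (by simp)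
      cases hE : PySem.List.sorted2 (PySem.List.pyRange 0 (PySem.List.len ts)) F (fun i => -i) true with
      | nil => exact absurd hE this
      | cons a b => exact ⟨a, b, rfl⟩
    have hall : ∀ y ∈ PySem.List.pyRange 0 (PySem.List.len ts), beforeRev F y m = false :=
      head_sorted2_max F _ m t hs
    have hmem : m ∈ PySem.List.pyRange 0 (PySem.List.len ts) := by
      have hperm := PySem.List.sorted2_perm (PySem.List.pyRange 0 (PySem.List.len ts)) F (fun i => -i) true
      rw [hs] at hperm
      exact hperm.mem_iff.mp (by simp)
    have hmax : ∀ y ∈ PySem.List.pyRange 0 (PySem.List.len ts), F y ≤ F m := by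
      intro y hy
      have := hall y hy
      simp only [beforeRev, Bool.or_eq_false_iff, Bool.and_eq_false_iff, decide_eq_false_iff_not,
        Bool.not_eq_false', decide_eq_true_eq] at this
      omega
    have hfirst : ∀ y ∈ PySem.List.pyRange 0 (PySem.List.len ts), F y = F m → m ≤ y := by
      intro y hy heq
      have := hall y hy
      simp only [beforeRev, Bool.or_eq_false_iff, Bool.and_eq_false_iff, decide_eq_false_iff_not,
        Bool.not_eq_false', decide_eq_true_eq] at this
      omega
    -- ¬ D_ gives some index with score ≥ 0, hence F m > -1
    have hgt : (-1 : Int) < F m := by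
      unfold D_select_primary_type_py at hnd
      push Not at hnd
      obtain ⟨k, hk, hks⟩ := hnd hts
      have hkmem : ((k : Int)) ∈ PySem.List.pyRange 0 (PySem.List.len ts) := by
        rw [PySem.List.mem_pyRange_one]
        constructor
        · omega
        · simp [PySem.List.len]; omega
      have hFk : F (k : Int) = (List.lookup ts[k] mp).getD 0 + ((ts.length : Int) - (k : Int)) := by
        simp [hF, PySem.List.len, List.getElem?_eq_getElem hk]
      have := hmax _ hkmem
      omega
    have hpw := pairwise_lt_pyRange_zero ts.length
    have hpw' : (PySem.List.pyRange 0 (PySem.List.len ts)).Pairwise (· < ·) := by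
      simpa [PySem.List.len] using hpw
    -- evaluate A
    have hA : select_primary_type_py ts mp = some ((PySem.List.pyGet? ts m).getD "") := by
      unfold select_primary_type_py
      rw [if_neg hts]
      simp only
      rw [PySem.List.enumerate_eq_map_pyRange ts "", List.foldl_map]
      have := foldA_argmax F (fun j => (PySem.List.pyGet? ts j).getD "")
        (PySem.List.pyRange 0 (PySem.List.len ts)) m hmem hpw' hmax hfirst (none, -1) hgt
      simp only [PySem.List.pyGetD] at this ⊢
      rw [this]
    -- evaluate B
    have hB : select_primary_type_py_alt ts mp = some ((PySem.List.pyGet? ts m).getD "") := by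
      unfold select_primary_type_py_alt
      rw [if_neg hts]
      simp only
      rw [hs]
      simp [PySem.List.pyGet?, PySem.List.pyIdx?]
    rw [hA, hB]

theorem select_primary_type_py_none_of_D :
    ∀ (filtered_types : List String) (type_priority_map : List (String × Int)),
    D_select_primary_type_py filtered_types type_priority_map →
    select_primary_type_py filtered_types type_priority_map = none := by
  intro ts mp hd
  obtain ⟨hts, hsc⟩ := hd
  unfold select_primary_type_py
  rw [if_neg hts]
  simp only
  rw [PySem.List.enumerate_eq_map_pyRange ts "", List.foldl_map]
  have h := foldA_const
    (fun i => (List.lookup ((PySem.List.pyGet? ts i).getD "") mp).getD 0 + (PySem.List.len ts - i))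
    (fun j => (PySem.List.pyGet? ts j).getD "")
    (PySem.List.pyRange 0 (PySem.List.len ts)) (none, -1) ?_
  · simp only [PySem.List.pyGetD] at h ⊢
    rw [h]
  · intro i hi
    rw [PySem.List.mem_pyRange_one] at hi
    obtain ⟨hi0, hin⟩ := hi
    simp only [PySem.List.len] at hin
    obtain ⟨k, rfl⟩ := Int.eq_ofNat_of_zero_le hi0
    have hk : k < ts.length := by exact_mod_cast hin
    have := hsc k hk
    simp only [PySem.List.len]
    rw [show (PySem.List.pyGet? ts (k : Int)).getD "" = ts.getD k "" by
      simp [PySem.List.pyGet?, PySem.List.pyIdx?, hk, List.getD_eq_getElem?_getD]]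
    rw [List.getD_eq_getElem ts "" hk]
    omega

-- ===== VERDICT (by name: the statement is the Claim_ definition above) =====
theorem select_primary_type_py_spec : Claim_unchanged_select_primary_type_py := by
  intro ts mp _ hnd
  exact select_primary_type_py_unchanged ts mp hnd

theorem select_primary_type_py_changed : Claim_changed_select_primary_type_py := by
  unfold Claim_changed_select_primary_type_py; decide

theorem select_primary_type_py_tight : Claim_exact_select_primary_type_py := by
  intro ts mp _ hd
  rw [select_primary_type_py_none_of_D ts mp hd]
  unfold select_primary_type_py_alt
  rw [if_neg hd.1]
  simp
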